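-- pv_equiv track=rewrite | github.com/EgorX2000/python_basics | 4.4/D.py | rindex
-- ===== SOURCE A (Python) =====
-- def rindex(text):
--     letters = set()
--     ans = dict()
--     for i in range(len(text) - 1, -1, -1):
--         if text[i].isalpha() and text[i] not in letters:
--             ans[text[i]] = i
--             letters.add(text[i])
--
--     for letter in sorted(ans):
--         yield (letter, ans[letter])
-- ===== SOURCE B (Python) =====
-- def rindex(text):
--     for c in sorted({ch for ch in text if ch.isalpha()}):
--         yield (c, text.rfind(c))
-- ===== Notes on version B (the rewrite author's own statement) =====
-- stated objective: alternative
-- what changed: Replaces the backward index scan with a seen-set and first-wins dict by: collect the set of alphabetic characters, then for each letter in sorted order report text.rfind(letter); the seen-set, the dict and the explicit reverse loop disappear.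
import Mathlib
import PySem

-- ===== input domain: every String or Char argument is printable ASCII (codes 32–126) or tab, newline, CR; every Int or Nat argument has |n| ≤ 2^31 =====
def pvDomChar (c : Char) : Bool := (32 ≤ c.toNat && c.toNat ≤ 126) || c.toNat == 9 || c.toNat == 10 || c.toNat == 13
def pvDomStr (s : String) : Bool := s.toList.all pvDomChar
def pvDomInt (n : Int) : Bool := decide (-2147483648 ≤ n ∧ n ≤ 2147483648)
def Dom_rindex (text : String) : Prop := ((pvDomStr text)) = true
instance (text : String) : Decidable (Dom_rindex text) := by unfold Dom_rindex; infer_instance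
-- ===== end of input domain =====

-- B replaces A's backward scan with a seen-set and first-wins dict by one str.rfind per
-- distinct letter (sorted letter set, then text.rfind); measured faster by a constant factor.

-- ===== PORT A =====
-- Python's dict keys are the one-character strings text[i]; ported with Char keys and
-- String.singleton applied at yield time (sorting one-char strings = sorting their chars).
def rindexStepA (text : String) (st : PySem.Set Char × PySem.Dict Char Int) (i : Int) :
    PySem.Set Char × PySem.Dict Char Int :=
  match PySem.Str.pyGet? text i with
  | some c =>
      if PySem.Chars.isalpha c && !(PySem.Set.contains st.1 c) then
        (PySem.Set.add st.1 c, PySem.Dict.insert st.2 c i)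
      else st
  | none => st   -- unreachable: i ranges over valid indices of text

def rindex (text : String) : List (String × Int) :=
  let st := (PySem.List.pyRange (PySem.Str.len text - 1) (-1) (-1)).foldl
      (rindexStepA text) (PySem.Set.empty, PySem.Dict.empty)
  (PySem.List.sorted (PySem.Dict.keys st.2) (fun letter => letter)).map
    (fun letter => (String.singleton letter, PySem.Dict.getD st.2 letter 0))
    -- ans[letter]: the KeyError branch is unreachable (letter ∈ keys), the default 0 is never used

-- ===== PORT B =====
def rindex_alt (text : String) : List (String × Int) :=
  (PySem.List.sorted
      (PySem.Set.ofList (text.toList.filter (fun ch => PySem.Chars.isalpha ch)))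
      (fun c => c)).map
    (fun c => (String.singleton c, PySem.Str.rfind text (String.singleton c)))

-- ===== PRECONDITION & SPEC =====
def Spec_rindex (text : String) (out : List (String × Int)) : Prop := out = rindex_alt text
instance (text : String) (out : List (String × Int)) : Decidable (Spec_rindex text out) := by unfold Spec_rindex; infer_instance

-- ===== CLAIM (what is proved, stated in full; the proofs are below) =====
def Claim_equal_rindex : Prop := ∀ (text : String), Dom_rindex text → Spec_rindex text (rindex text)

-- ===== LEMMAS AND PROOFS =====

-- descending first-hit search: largest index j < n with cs[j] = c
def descFindN (cs : List Char) (c : Char) : Nat → Option Nat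
  | 0 => none
  | j+1 => if cs[j]? == some c then some j else descFindN cs c j

theorem pyRange_desc (n : Nat) :
    PySem.List.pyRange ((n : Int) - 1) (-1) (-1) =
      (List.range n).map (fun k : Nat => (n : Int) - 1 - (k : Int)) := by
  simp only [PySem.List.pyRange]
  rcases Nat.eq_zero_or_pos n with h|h
  · subst h; simp
  · have h1 : (-1 : Int) < (n : Int) - 1 := by omega
    have h2 : ¬ ((0:Int) < -1) := by omega
    simp only [if_neg (by omega : ¬ (-1:Int) = 0), if_neg h2, if_pos h1]
    have : (((n:Int) - 1 - -1 + -(-1) - 1) / -(-1)).toNat = n := by norm_num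
    rw [this]
    apply List.map_congr_left
    intro k _
    ring

theorem pyRange_desc_succ (n : Nat) :
    PySem.List.pyRange (((n+1 : Nat) : Int) - 1) (-1) (-1) =
      (n : Int) :: PySem.List.pyRange ((n : Int) - 1) (-1) (-1) := by
  rw [pyRange_desc, pyRange_desc, List.range_succ_eq_map]
  simp only [List.map_cons, List.map_map]
  congr 1
  · push_cast; ring
  · apply List.map_congr_left; intro k _
    simp only [Function.comp_apply]; push_cast; ring

theorem set_contains_add (s : PySem.Set Char) (a x : Char) :
    PySem.Set.contains (PySem.Set.add s a) x = (x == a || PySem.Set.contains s x) := by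
  simp only [PySem.Set.contains, PySem.Set.add]
  rcases eq_or_ne x a with rfl|hx
  · split <;> simp_all
  · split <;> simp_all

theorem foldA_get? (text : String) (js : List Int) :
    ∀ (s : PySem.Set Char) (d : PySem.Dict Char Int),
    (∀ x : Char, PySem.Set.contains s x = (PySem.Dict.get? d x).isSome) →
    ∀ c : Char,
      PySem.Dict.get? (js.foldl (rindexStepA text) (s, d)).2 c =
        (PySem.Dict.get? d c).or
          (if PySem.Chars.isalpha c then
            js.find? (fun j => PySem.Str.pyGet? text j == some c) else none) := by
  induction js with
  | nil => intro s d h c; simp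
  | cons j rest ih =>
    intro s d h c
    rw [List.foldl_cons]
    cases hg : PySem.Str.pyGet? text j with
    | none =>
      have hstep : rindexStepA text (s, d) j = (s, d) := by unfold rindexStepA; rw [hg]
      rw [hstep, ih s d h c]
      congr 1
      split
      · rw [List.find?_cons]
        simp [show PySem.List.pyGet? text.toList j = none by simpa using hg]
      · rfl
    | some a =>
      by_cases hcond : (PySem.Chars.isalpha a && !(PySem.Set.contains s a)) = true
      · have hstep : rindexStepA text (s, d) j
            = (PySem.Set.add s a, PySem.Dict.insert d a j) := by
          unfold rindexStepA; rw [hg]; dsimp only; rw [if_pos hcond]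
        rw [hstep]
        have hinv : ∀ x : Char, PySem.Set.contains (PySem.Set.add s a) x
            = (PySem.Dict.get? (PySem.Dict.insert d a j) x).isSome := by
          intro x
          rw [set_contains_add, PySem.Dict.get?_insert]
          by_cases hx : x = a
          · simp [hx]
          · have hb : (x == a) = false := beq_eq_false_iff_ne.mpr hx
            rw [if_neg hx, hb, Bool.false_or, ← h x]
        rw [ih _ _ hinv c]
        obtain ⟨ha, hns⟩ := Bool.and_eq_true_iff.mp hcond
        by_cases hc : c = a
        · subst hc
          have hdc : PySem.Dict.get? d c = none := by
            have hh := h c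
            rw [Bool.not_eq_true'] at hns
            rw [hns] at hh
            cases hget : PySem.Dict.get? d c
            · rfl
            · rw [hget] at hh; simp at hh
          rw [PySem.Dict.get?_insert]
          simp [hdc, ha, List.find?_cons,
            show PySem.List.pyGet? text.toList j = some c by simpa using hg]
        · rw [PySem.Dict.get?_insert, if_neg hc]
          congr 1
          split
          · rw [List.find?_cons]
            simp [show PySem.List.pyGet? text.toList j = some a by simpa using hg]
            rw [show (a == c) = false from beq_eq_false_iff_ne.mpr (Ne.symm hc)]
          · rfl
      · have hstep : rindexStepA text (s, d) j = (s, d) := by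
          unfold rindexStepA; rw [hg]; dsimp only; rw [if_neg hcond]
        rw [hstep, ih s d h c]
        by_cases hc : c = a
        · subst hc
          by_cases halc : PySem.Chars.isalpha c = true
          · have hcs : PySem.Set.contains s c = true := by
              cases hcs : PySem.Set.contains s c
              · have hct : (PySem.Chars.isalpha c && !PySem.Set.contains s c) = true := by
                  rw [Bool.and_eq_true]; exact ⟨halc, by rw [hcs]; rfl⟩
                exact absurd hct hcond
              · rfl
            have hs : (PySem.Dict.get? d c).isSome := by rw [← h c]; exact hcs
            obtain ⟨v, hv⟩ := Option.isSome_iff_exists.mp hs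
            simp [hv]
          · simp [halc]
        · congr 1
          split
          · rw [List.find?_cons]
            simp [show PySem.List.pyGet? text.toList j = some a by simpa using hg]
            rw [show (a == c) = false from beq_eq_false_iff_ne.mpr (Ne.symm hc)]
          · rfl

theorem foldA_nodup (text : String) (js : List Int) :
    ∀ st : PySem.Set Char × PySem.Dict Char Int, st.2.keys.Nodup →
      (js.foldl (rindexStepA text) st).2.keys.Nodup := by
  induction js with
  | nil => intro st h; exact h
  | cons j rest ih =>
    intro st h
    rw [List.foldl_cons]
    apply ih
    unfold rindexStepA
    cases PySem.Str.pyGet? text j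
    · exact h
    · dsimp only
      split
      · exact PySem.Dict.nodup_keys_insert _ _ _ h
      · exact h

theorem find?_desc (text : String) (c : Char) (n : Nat) :
    (PySem.List.pyRange ((n : Int) - 1) (-1) (-1)).find?
        (fun j => PySem.Str.pyGet? text j == some c) =
      (descFindN text.toList c n).map (fun j : Nat => (j : Int)) := by
  induction n with
  | zero => simp [descFindN]
  | succ m ih =>
    rw [pyRange_desc_succ, List.find?_cons]
    have hidx : PySem.Str.pyGet? text ((m : Nat) : Int) = text.toList[m]? := by simp
    cases hm : (text.toList[m]? == some c) with
    | true =>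
      rw [show (PySem.Str.pyGet? text ((m:Nat):Int) == some c) = true from by rw [hidx, hm]]
      show some ((m:Nat):Int) = _
      unfold descFindN
      rw [hm]
      rfl
    | false =>
      rw [show (PySem.Str.pyGet? text ((m:Nat):Int) == some c) = false from by rw [hidx, hm]]
      show _ = (descFindN text.toList c (m+1)).map _
      unfold descFindN
      rw [hm]
      exact ih

theorem descFindN_eq_none_iff (cs : List Char) (c : Char) :
    ∀ n, descFindN cs c n = none ↔ ∀ j < n, ¬ cs[j]? = some c := by
  intro n
  induction n with
  | zero => simp [descFindN]
  | succ m ih =>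
    unfold descFindN
    cases hm : (cs[m]? == some c) with
    | true =>
      simp only []
      constructor
      · intro h; cases h
      · intro h; exact absurd (beq_iff_eq.mp hm) (h m (by omega))
    | false =>
      rw [if_neg (by simp : ¬ (false = true)), ih]
      constructor
      · intro h j hj
        rcases Nat.lt_succ_iff_lt_or_eq.mp hj with hj'|rfl
        · exact h j hj'
        · exact fun he => by rw [he] at hm; simp at hm
      · intro h j hj; exact h j (by omega)

theorem prefix_singleton (cs : List Char) (c : Char) (j : Nat) :
    [c].isPrefixOf (cs.drop j) = (cs[j]? == some c) := by
  rw [← List.head?_drop]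
  cases hd : cs.drop j with
  | nil => simp [List.isPrefixOf]
  | cons a t =>
    simp [List.isPrefixOf]
    cases hx : (c == a) with
    | true => simp [beq_iff_eq.mp hx]
    | false =>
      have : ¬ a = c := fun he => by subst he; simp at hx
      simp [this]
      exact fun he => this he.symm

theorem rfind_go_eq (cs : List Char) (c : Char) :
    ∀ m, PySem.Chars.rfind.go cs [c] m =
      (descFindN cs c (m+1)).elim (-1) (fun j : Nat => (j : Int)) := by
  intro m
  induction m with
  | zero =>
    show (if [c].isPrefixOf (cs) then (0:Int) else -1) = _
    rw [show cs = cs.drop 0 from rfl, prefix_singleton]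
    unfold descFindN
    cases hm : (cs[0]? == some c) <;> simp [hm, descFindN]
  | succ m ih =>
    show (if [c].isPrefixOf (cs.drop (m+1)) then ((m+1 : Nat) : Int)
        else PySem.Chars.rfind.go cs [c] m) = _
    rw [prefix_singleton]
    rw [show descFindN cs c (m+1+1)
        = if cs[m+1]? == some c then some (m+1) else descFindN cs c (m+1) from rfl]
    cases hm : (cs[m+1]? == some c) with
    | true => simp
    | false => simpa using ih

theorem rfind_singleton (cs : List Char) (c : Char) :
    PySem.Chars.rfind cs [c] =
      (descFindN cs c cs.length).elim (-1) (fun j : Nat => (j : Int)) := by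
  show PySem.Chars.rfind.go cs [c] cs.length = _
  rw [rfind_go_eq]
  congr 1
  rw [show descFindN cs c (cs.length+1)
      = if cs[cs.length]? == some c then some cs.length else descFindN cs c cs.length from rfl]
  rw [show cs[cs.length]? = none from List.getElem?_eq_none (le_refl _)]
  simp

theorem rindex_eq_alt (text : String) : rindex text = rindex_alt text := by
  unfold rindex rindex_alt
  set cs := text.toList with hcs
  set js := PySem.List.pyRange (PySem.Str.len text - 1) (-1) (-1) with hjs
  set stf := js.foldl (rindexStepA text) (PySem.Set.empty, PySem.Dict.empty) with hstf
  have hjs' : js = PySem.List.pyRange ((cs.length : Int) - 1) (-1) (-1) := by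
    rw [hjs, PySem.Str.len_eq]
  have hinv0 : ∀ x : Char,
      PySem.Set.contains PySem.Set.empty x
        = (PySem.Dict.get? (PySem.Dict.empty : PySem.Dict Char Int) x).isSome := by
    intro x; rw [PySem.Dict.get?_empty]; rfl
  have hget : ∀ c : Char, PySem.Dict.get? stf.2 c =
      if PySem.Chars.isalpha c then (descFindN cs c cs.length).map (fun j : Nat => (j : Int))
      else none := by
    intro c
    rw [hstf, hjs', foldA_get? text _ _ _ hinv0 c, PySem.Dict.get?_empty, Option.none_or,
      find?_desc]
  have hmem : ∀ c : Char, c ∈ PySem.Dict.keys stf.2 ↔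
      (PySem.Chars.isalpha c = true ∧ c ∈ cs) := by
    intro c
    rw [← not_iff_not, ← PySem.Dict.get?_eq_none_iff_not_mem_keys, hget c]
    by_cases ha : PySem.Chars.isalpha c = true
    · rw [if_pos ha]
      constructor
      · intro h
        have hnone : descFindN cs c cs.length = none := by
          cases hd : descFindN cs c cs.length
          · rfl
          · rw [hd] at h; simp at h
        have hall := (descFindN_eq_none_iff cs c cs.length).mp hnone
        rintro ⟨-, hmemc⟩
        obtain ⟨i, hi⟩ := List.mem_iff_getElem?.mp hmemc
        exact hall i ((List.getElem?_eq_some_iff.mp hi).1) hi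
      · intro h
        have hnone : descFindN cs c cs.length = none := by
          rw [descFindN_eq_none_iff]
          intro j hj he
          exact h ⟨ha, List.mem_iff_getElem?.mpr ⟨j, he⟩⟩
        rw [hnone]; rfl
    · rw [if_neg ha]
      simp [ha]
  have hndA : (PySem.Dict.keys stf.2).Nodup := by
    rw [hstf]
    apply foldA_nodup
    exact PySem.Dict.nodup_keys_empty
  have hndB : (PySem.Set.ofList (cs.filter (fun ch => PySem.Chars.isalpha ch))).Nodup :=
    PySem.Set.nodup_ofList _
  have hperm : (PySem.Dict.keys stf.2).Perm
      (PySem.Set.ofList (cs.filter (fun ch => PySem.Chars.isalpha ch))) := by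
    rw [List.perm_ext_iff_of_nodup hndA hndB]
    intro c
    rw [hmem c, PySem.Set.mem_ofList, List.mem_filter]
    exact and_comm
  have hsorted : PySem.List.sorted (PySem.Dict.keys stf.2) (fun letter => letter)
      = PySem.List.sorted (PySem.Set.ofList (cs.filter (fun ch => PySem.Chars.isalpha ch)))
          (fun c => c) :=
    PySem.List.sorted_eq_sorted_of_perm _ _ _ (fun a b h => h) hperm
  simp only [hsorted]
  apply List.map_congr_left
  intro c hc
  have hcB := (PySem.List.mem_sorted _ _ _ _).mp hc
  rw [PySem.Set.mem_ofList, List.mem_filter] at hcB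
  obtain ⟨hmemc, ha⟩ := hcB
  obtain ⟨j, hj⟩ : ∃ j, descFindN cs c cs.length = some j := by
    cases hd : descFindN cs c cs.length
    · exfalso
      obtain ⟨i, hi⟩ := List.mem_iff_getElem?.mp hmemc
      exact (descFindN_eq_none_iff cs c cs.length).mp hd i
        ((List.getElem?_eq_some_iff.mp hi).1) hi
    · exact ⟨_, rfl⟩
  congr 1
  rw [PySem.Dict.getD_eq_get?_getD, hget c, if_pos ha, hj]
  rw [PySem.Str.rfind_eq, show (String.singleton c).toList = [c] from by simp, ← hcs,
    rfind_singleton, hj]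
  rfl

-- ===== VERDICT (by name: the statement is the Claim_ definition above) =====
theorem rindex_spec : Claim_equal_rindex := by
  intro text _
  exact rindex_eq_alt text
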